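-- pv_equiv track=rewrite | github.com/bica-tools/reticulate | reticulate/resource_leak.py | _states_at_rank
-- ===== SOURCE A (Python) =====
-- def _states_at_rank(
--     ranks: dict[int, int],
--     num_ranks: int,
-- ) -> list[list[int]]:
--     """Group states by rank."""
--     result: list[list[int]] = [[] for _ in range(num_ranks)]
--     for s, r in ranks.items():
--         result[r].append(s)
--     for lst in result:
--         lst.sort()
--     return result
-- ===== SOURCE B (Python) =====
-- def _states_at_rank(
--     ranks: dict[int, int],
--     num_ranks: int,
-- ) -> list[list[int]]:
--     """Group states by rank."""
--     result: list[list[int]] = [[] for _ in range(num_ranks)]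
--     for s in sorted(ranks):
--         result[ranks[s]].append(s)
--     return result
-- ===== Notes on version B (the rewrite author's own statement) =====
-- stated objective: simpler
-- what changed: B iterates the states in globally ascending order and appends each into its rank's bucket, so every bucket is sorted by construction and A's per-bucket sort pass disappears.
import Mathlib
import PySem

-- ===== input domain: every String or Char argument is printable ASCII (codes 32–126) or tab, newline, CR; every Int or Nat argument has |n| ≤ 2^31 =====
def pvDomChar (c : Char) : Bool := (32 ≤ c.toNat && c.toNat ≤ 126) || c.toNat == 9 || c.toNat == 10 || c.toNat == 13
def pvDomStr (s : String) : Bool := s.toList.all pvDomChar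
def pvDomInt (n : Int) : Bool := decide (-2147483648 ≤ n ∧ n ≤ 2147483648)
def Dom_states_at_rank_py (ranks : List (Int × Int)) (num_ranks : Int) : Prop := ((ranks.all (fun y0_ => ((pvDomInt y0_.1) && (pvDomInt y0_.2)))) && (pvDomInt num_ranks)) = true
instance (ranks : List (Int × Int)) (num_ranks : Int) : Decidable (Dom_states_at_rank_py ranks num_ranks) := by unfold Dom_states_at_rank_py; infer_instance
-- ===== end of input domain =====

-- B replaces A's per-bucket sort pass by one global ascending iteration over the states,
-- which fills each bucket already sorted (objective: simpler).

-- ===== PORT A =====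
-- result[r].append(s) / result[r] with a possibly negative r: pySetD/pyGetD (Python wraparound)
def states_at_rank_py (ranks : List (Int × Int)) (num_ranks : Int) : List (List Int) :=
  let result : List (List Int) := (PySem.List.pyRange 0 num_ranks 1).map (fun _ => ([] : List Int))
  let result := (PySem.Dict.ofList ranks).items.foldl
    (fun res p => PySem.List.pySetD res p.2 (PySem.List.pyGetD res p.2 [] ++ [p.1])) result
  result.map (fun lst => PySem.List.sorted lst (fun x => x) false)

-- ===== PORT B =====
def states_at_rank_py_alt (ranks : List (Int × Int)) (num_ranks : Int) : List (List Int) :=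
  let result : List (List Int) := (PySem.List.pyRange 0 num_ranks 1).map (fun _ => ([] : List Int))
  let d := PySem.Dict.ofList ranks
  (PySem.List.sorted d.keys (fun x => x) false).foldl
    (fun res s => PySem.List.pySetD res (d.getD s 0) (PySem.List.pyGetD res (d.getD s 0) [] ++ [s])) result

-- ===== PRECONDITION & SPEC =====
-- Pre_ excludes exactly the inputs where result[r] raises IndexError in both programs:
-- some state's (final) rank lies outside [-num_ranks, num_ranks).
def Pre_states_at_rank_py (ranks : List (Int × Int)) (num_ranks : Int) : Prop :=
  ∀ p ∈ (PySem.Dict.ofList ranks).items, -num_ranks ≤ p.2 ∧ p.2 < num_ranks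
instance (ranks : List (Int × Int)) (num_ranks : Int) : Decidable (Pre_states_at_rank_py ranks num_ranks) := by unfold Pre_states_at_rank_py; infer_instance

def pvWitness_states_at_rank_py : (List (Int × Int)) × Int := ([(3, 0), (1, 1), (2, 0)], 2)

def Spec_states_at_rank_py (ranks : List (Int × Int)) (num_ranks : Int) (out : List (List Int)) : Prop := out = states_at_rank_py_alt ranks num_ranks
instance (ranks : List (Int × Int)) (num_ranks : Int) (out : List (List Int)) : Decidable (Spec_states_at_rank_py ranks num_ranks out) := by unfold Spec_states_at_rank_py; infer_instance

-- ===== CLAIM (what is proved, stated in full; the proofs are below) =====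
def Claim_equal_states_at_rank_py : Prop := ∀ (ranks : List (Int × Int)) (num_ranks : Int), Dom_states_at_rank_py ranks num_ranks → Pre_states_at_rank_py ranks num_ranks → Spec_states_at_rank_py ranks num_ranks (states_at_rank_py ranks num_ranks)

-- ===== LEMMAS AND PROOFS =====

-- the Nat bucket index denoted by a (possibly negative) in-range Python index r
def pvBucketIdx (n : Nat) (r : Int) : Nat := if r < 0 then (r + n).toNat else r.toNat

theorem pvIdx_eq (n : Nat) (r : Int) (h : PySem.Raise.InRange n r) :
    PySem.List.pyIdx? n r = some (pvBucketIdx n r) := by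
  rcases h with ⟨h1, h2⟩
  simp only [PySem.List.pyIdx?, pvBucketIdx]
  rcases lt_or_ge r 0 with hneg | hpos
  · rw [if_neg (by omega), if_pos (by omega), if_pos hneg]
    congr 1
    omega
  · rw [if_pos (by omega), if_pos (by omega), if_neg (by omega)]

theorem pvBucketIdx_lt (n : Nat) (r : Int) (h : PySem.Raise.InRange n r) :
    pvBucketIdx n r < n := by
  rcases h with ⟨h1, h2⟩; simp only [pvBucketIdx]; split_ifs <;> omega

theorem pvSetD_eq {α : Type} (xs : List α) (r : Int) (v : α)
    (h : PySem.Raise.InRange xs.length r) :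
    PySem.List.pySetD xs r v = xs.set (pvBucketIdx xs.length r) v := by
  simp [PySem.List.pySetD, PySem.List.pySet?, pvIdx_eq _ _ h]

theorem pvGetD_eq {α : Type} (xs : List α) (r : Int) (d : α)
    (h : PySem.Raise.InRange xs.length r) :
    PySem.List.pyGetD xs r d = xs.getD (pvBucketIdx xs.length r) d := by
  simp [PySem.List.pyGetD, PySem.List.pyGet?, pvIdx_eq _ _ h, List.getD]

-- the shared loop step of both ports
def pvStep (res : List (List Int)) (s r : Int) : List (List Int) :=
  PySem.List.pySetD res r (PySem.List.pyGetD res r [] ++ [s])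

theorem pvStep_length (res : List (List Int)) (s r : Int) :
    (pvStep res s r).length = res.length := by
  simp [pvStep, PySem.List.pySetD, PySem.List.pySet?]
  cases h : PySem.List.pyIdx? res.length r <;> simp

-- how the append-at-index loop fills bucket i
theorem pvLoop_getElem (ps : List (Int × Int)) :
    ∀ (acc : List (List Int)),
    (∀ p ∈ ps, PySem.Raise.InRange acc.length p.2) →
    ∀ i (hi : i < acc.length) (hlen : (ps.foldl (fun res p => pvStep res p.1 p.2) acc).length = acc.length),
    (ps.foldl (fun res p => pvStep res p.1 p.2) acc)[i]'(by omega) =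
      acc[i] ++ (ps.filter (fun p => pvBucketIdx acc.length p.2 == i)).map Prod.fst := by
  induction ps with
  | nil => intro acc _ i hi _; simp
  | cons hd tl ih =>
    intro acc hpre i hi hlen
    have hhd : PySem.Raise.InRange acc.length hd.2 := hpre hd (by simp)
    have hstep := pvStep_length acc hd.1 hd.2
    have hpre' : ∀ p ∈ tl, PySem.Raise.InRange (pvStep acc hd.1 hd.2).length p.2 := by
      intro p hp; rw [hstep]; exact hpre p (by simp [hp])
    have hlen' : (tl.foldl (fun res p => pvStep res p.1 p.2) (pvStep acc hd.1 hd.2)).length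
        = (pvStep acc hd.1 hd.2).length := by
      rw [hstep]; simpa using hlen
    have := ih (pvStep acc hd.1 hd.2) hpre' i (by omega) hlen'
    simp only [List.foldl_cons]
    rw [this]
    have hj := pvBucketIdx_lt acc.length hd.2 hhd
    have hset : pvStep acc hd.1 hd.2
        = acc.set (pvBucketIdx acc.length hd.2) (acc[pvBucketIdx acc.length hd.2] ++ [hd.1]) := by
      rw [pvStep, pvSetD_eq _ _ _ hhd, pvGetD_eq _ _ _ hhd, List.getD_eq_getElem _ _ hj]
    by_cases hcase : pvBucketIdx acc.length hd.2 = i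
    · subst hcase
      rw [List.filter_cons_of_pos (by simp)]
      simp [hset]
    · rw [List.filter_cons_of_neg (by simp [hcase])]
      simp [hset, hcase]

theorem pvLoop_length (ps : List (Int × Int)) :
    ∀ (acc : List (List Int)),
    (ps.foldl (fun res p => pvStep res p.1 p.2) acc).length = acc.length := by
  induction ps with
  | nil => intro acc; rfl
  | cons hd tl ih => intro acc; rw [List.foldl_cons, ih, pvStep_length]

theorem pvPerm_pairwise_lt (l l' : List Int) (hp : l.Perm l') (hnd : l'.Nodup)
    (hle : l.Pairwise (· ≤ ·)) : l.Pairwise (· < ·) := by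
  have hnd' : l.Nodup := (hp.nodup_iff).mpr hnd
  exact (hle.and hnd').imp fun h => lt_of_le_of_ne h.1 h.2

-- ===== VERDICT (by name: the statement is the Claim_ definition above) =====

theorem states_at_rank_py_spec : Claim_equal_states_at_rank_py := by
  intro ranks num_ranks _ hpre
  unfold Spec_states_at_rank_py states_at_rank_py states_at_rank_py_alt
  set d := PySem.Dict.ofList ranks with hd
  set init : List (List Int) := (PySem.List.pyRange 0 num_ranks 1).map (fun _ => ([] : List Int)) with hinit
  set n := init.length with hn
  have hninit : ∀ i (h : i < n), init[i] = ([] : List Int) := by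
    intro i h
    simp [hinit]
  have hnlen : init.length = num_ranks.toNat := by
    simp [hinit, PySem.List.length_pyRange_one]
  have hkeys_nodup : d.keys.Nodup := PySem.Dict.nodup_keys_ofList ranks
  have hitems : d.items = d.keys.map (fun k => (k, d.getD k 0)) :=
    PySem.Dict.items_eq_map_keys d hkeys_nodup 0
  set sk := PySem.List.sorted d.keys (fun x => x) false with hsk
  have hsk_perm : sk.Perm d.keys := PySem.List.sorted_perm d.keys (fun x => x) false
  have hsk_pw_lt : sk.Pairwise (· < ·) := by
    refine pvPerm_pairwise_lt sk d.keys hsk_perm hkeys_nodup ?_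
    exact PySem.List.sorted_pairwise d.keys (fun x => x)
  set f : Int → Int × Int := fun s => (s, d.getD s 0) with hf
  set ps' := sk.map f with hps'
  have hps'_items : ps'.Perm d.items := by
    rw [hitems]; exact hsk_perm.map f
  have hpreA : ∀ p ∈ d.items, PySem.Raise.InRange init.length p.2 := by
    intro p hp
    have := hpre p hp
    rw [hnlen]
    constructor <;> omega
  have hpreB : ∀ p ∈ ps', PySem.Raise.InRange init.length p.2 := by
    intro p hp
    exact hpreA p (hps'_items.mem_iff.mp hp)
  have hlenA : (d.items.foldl (fun res p => pvStep res p.1 p.2) init).length = init.length :=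
    pvLoop_length d.items init
  have hlenB : (ps'.foldl (fun res p => pvStep res p.1 p.2) init).length = init.length :=
    pvLoop_length ps' init
  have hB : sk.foldl
      (fun res s => PySem.List.pySetD res (d.getD s 0) (PySem.List.pyGetD res (d.getD s 0) [] ++ [s])) init
      = ps'.foldl (fun res p => pvStep res p.1 p.2) init := by
    rw [hps', List.foldl_map]
    rfl
  rw [hB]
  have hstepA : (fun res (p : Int × Int) =>
      PySem.List.pySetD res p.2 (PySem.List.pyGetD res p.2 [] ++ [p.1]))
      = fun res p => pvStep res p.1 p.2 := rfl
  rw [hstepA]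
  apply List.ext_getElem
  · simp [hlenA, hlenB]
  · intro i h1 h2
    have hiA : i < init.length := by simpa [hlenA] using h1
    rw [List.getElem_map]
    rw [pvLoop_getElem d.items init hpreA i hiA hlenA]
    rw [pvLoop_getElem ps' init hpreB i (by simpa [hlenB] using h2) hlenB]
    rw [hninit i hiA]
    simp only [List.nil_append]
    apply PySem.List.sorted_eq_of_perm_of_pairwise_lt
    · exact (hps'_items.filter _).map Prod.fst
    · have hsub : ((ps'.filter (fun p => pvBucketIdx init.length p.2 == i)).map Prod.fst).Sublist
          (ps'.map Prod.fst) := List.filter_sublist.map Prod.fst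
      have hmapfst : ps'.map Prod.fst = sk := by
        rw [hps', List.map_map]
        simp [hf, Function.comp_def]
      rw [hmapfst] at hsub
      exact hsk_pw_lt.sublist hsub
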